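-- pv_equiv track=rewrite | github.com/w15hy/sy_00 | assembly/assembly.py | encode_f2
-- ===== SOURCE A (Python) =====
-- pre_instr = {
--     1: {"pre": "0001", "opcode_bits": 10},  # F1: reg/inm
--     2: {"pre": "0010", "opcode_bits": 8},   # F2: memoria
--     3: {"pre": "0011", "opcode_bits": 10},  # F3: saltos
--     4: {"pre": "0000", "opcode_bits": 6},   # F4: control
-- }
--
-- def zfill_bin(num, bits):
--     # Maneja números negativos con complemento a dos truncado al ancho indicado
--     if num < 0:
--         num = num & ((1 << bits) - 1)
--     return bin(num)[2:].zfill(bits)[-bits:]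
--
-- def encode_f2(opcode, keywords):
--     """
--     [ pre(4) ][ opcode(8) ][ modo(6) ][ r1(4) ][ base(4) ][ index(4) ][ scale(2) ][ offset(32) ]
--     = 64 bits
--     """
--     pre        = pre_instr[2]["pre"]
--     opcode_bin = zfill_bin(opcode, 8)
--     modo       = 0
--     r1 = base = index = 0
--     scale = 0
--     offset = 0
--
--     regs     = []
--     literals = []
--     for kw in keywords:
--         kl = kw.lower()
--         if kl.startswith("r") and kl[1:].isdigit() and int(kl[1:]) <= 15:
--             regs.append(int(kl[1:]))
--         else:
--             literals.append(int(kw, 0))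
--
--     if len(regs) > 0: r1    = regs[0]
--     if len(regs) > 1: base  = regs[1]
--     if len(regs) > 2: index = regs[2]
--     if len(literals) > 0: scale  = literals[0]
--     if len(literals) > 1: offset = literals[1]
--
--     bits = (
--         pre
--         + opcode_bin
--         + zfill_bin(modo,   6)
--         + zfill_bin(r1,     4)
--         + zfill_bin(base,   4)
--         + zfill_bin(index,  4)
--         + zfill_bin(scale,  2)
--         + zfill_bin(offset, 32)
--     )
--     assert len(bits) == 64, f"F2 debe ser 64 bits, got {len(bits)}"
--     return bits
-- ===== SOURCE B (Python) =====
-- def encode_f2(opcode, keywords):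
--     reg_count = lit_count = 0
--     r1 = base = index = scale = offset = 0
--     for kw in keywords:
--         kl = kw.lower()
--         if kl.startswith("r") and kl[1:].isdigit() and int(kl[1:]) <= 15:
--             v = int(kl[1:])
--             if reg_count == 0:
--                 r1 = v
--             elif reg_count == 1:
--                 base = v
--             elif reg_count == 2:
--                 index = v
--             reg_count += 1
--         else:
--             v = int(kw, 0)
--             if lit_count == 0:
--                 scale = v
--             elif lit_count == 1:
--                 offset = v
--             lit_count += 1
--     value = ((0b0010 << 60)
--              + ((opcode & 0xFF) << 52)
--              + (0 << 46)
--              + ((r1 & 0xF) << 42)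
--              + ((base & 0xF) << 38)
--              + ((index & 0xF) << 34)
--              + ((scale & 0x3) << 32)
--              + (offset & 0xFFFFFFFF))
--     return format(value, '064b')
-- ===== Notes on version B (the rewrite author's own statement) =====
-- stated objective: idiomatic
-- what changed: B classifies keywords in one pass with counters that assign r1/base/index/scale/offset directly (no intermediate regs/literals lists and no post-loop indexing) and then packs the masked fields into a single 64-bit integer by shifts, rendering it once with format(value,'064b'), instead of A's two-list parse plus eight zfill_bin string concatenations.
import Mathlib
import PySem

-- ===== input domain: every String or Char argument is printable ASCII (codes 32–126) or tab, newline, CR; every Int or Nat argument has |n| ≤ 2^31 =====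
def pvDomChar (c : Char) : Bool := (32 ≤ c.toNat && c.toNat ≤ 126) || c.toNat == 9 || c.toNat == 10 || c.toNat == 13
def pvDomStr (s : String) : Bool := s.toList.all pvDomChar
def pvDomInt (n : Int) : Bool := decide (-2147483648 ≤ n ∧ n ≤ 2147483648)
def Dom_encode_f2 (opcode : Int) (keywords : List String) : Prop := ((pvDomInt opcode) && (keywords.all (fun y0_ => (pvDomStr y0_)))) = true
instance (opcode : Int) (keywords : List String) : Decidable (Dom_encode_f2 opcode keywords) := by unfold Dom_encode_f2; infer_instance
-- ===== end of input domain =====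

-- B re-implements the encoder by one-pass counter classification and arithmetic bit-packing of a
-- single 64-bit integer instead of A's two-list parsing, indexing and 8-substring concatenation;
-- objective: alternative/idiomatic, same asymptotic cost.

-- Shared keyword parsing (both Pythons classify a keyword with the identical test
-- kl.startswith("r") and kl[1:].isdigit() and int(kl[1:]) <= 15):
def pvIsReg (kw : String) : Bool :=
  let kl := PySem.Str.lower kw
  let t := PySem.Str.slice kl (some 1) none
  PySem.Str.startswith kl "r" && PySem.Str.strIsdigit t &&
    decide ((PySem.Int.ofStr? t).getD 0 ≤ 15)   -- int never raises here: t is nonempty all-digits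

def pvRegVal (kw : String) : Int :=
  (PySem.Int.ofStr? (PySem.Str.slice (PySem.Str.lower kw) (some 1) none)).getD 0

-- ===== PORT A =====

-- zfill_bin(num, bits): bits is always a positive literal at every call site, so it is a Nat here.
def zfill_bin (num : Int) (bits : Nat) : String :=
  let n := if num < 0 then PySem.Int.band num ((1 : Int) <<< bits - 1) else num
  PySem.Str.slice
    (PySem.Str.zfill (PySem.Str.slice (PySem.Int.pyBin n) (some 2) none) (bits : Int))
    (some (-(bits : Int))) none

def encode_f2 (opcode : Int) (keywords : List String) : String :=
  let pre := "0010"                      -- pre_instr[2]["pre"]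
  let opcode_bin := zfill_bin opcode 8
  let modo : Int := 0
  -- int(kw, 0) raises ValueError on unparsable keywords: those inputs are outside Pre_encode_f2
  let st := keywords.foldl (fun (acc : List Int × List Int) kw =>
      if pvIsReg kw then (acc.1 ++ [pvRegVal kw], acc.2)
      else (acc.1, acc.2 ++ [(PySem.Int.ofStrBase? kw 0).getD 0])) ([], [])
  let regs := st.1
  let literals := st.2
  let r1     := if 0 < regs.length then PySem.List.pyGetD regs 0 0 else 0
  let base   := if 1 < regs.length then PySem.List.pyGetD regs 1 0 else 0
  let index  := if 2 < regs.length then PySem.List.pyGetD regs 2 0 else 0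
  let scale  := if 0 < literals.length then PySem.List.pyGetD literals 0 0 else 0
  let offset := if 1 < literals.length then PySem.List.pyGetD literals 1 0 else 0
  pre ++ opcode_bin ++ zfill_bin modo 6 ++ zfill_bin r1 4 ++ zfill_bin base 4 ++
    zfill_bin index 4 ++ zfill_bin scale 2 ++ zfill_bin offset 32

-- ===== PORT B =====

-- fixed-width binary rendering: format(v, '0{w}b') for 0 ≤ v < 2^w (exact there)
def pvPadBin : Nat → Nat → List Char
  | 0, _ => []
  | w + 1, v => pvPadBin w (v / 2) ++ [Nat.digitChar (v % 2)]

def pvAltStep (st : Int × Int × Int × Int × Int × Int × Int) (kw : String) :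
    Int × Int × Int × Int × Int × Int × Int :=
  let (rc, lc, r1, base, idx, sc, off) := st
  if pvIsReg kw then
    let v := pvRegVal kw
    if rc == 0 then (rc + 1, lc, v, base, idx, sc, off)
    else if rc == 1 then (rc + 1, lc, r1, v, idx, sc, off)
    else if rc == 2 then (rc + 1, lc, r1, base, v, sc, off)
    else (rc + 1, lc, r1, base, idx, sc, off)
  else
    let v := (PySem.Int.ofStrBase? kw 0).getD 0   -- int(kw, 0); ValueError outside Pre_encode_f2
    if lc == 0 then (rc, lc + 1, r1, base, idx, v, off)
    else if lc == 1 then (rc, lc + 1, r1, base, idx, sc, v)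
    else (rc, lc + 1, r1, base, idx, sc, off)

def encode_f2_alt (opcode : Int) (keywords : List String) : String :=
  let st := keywords.foldl pvAltStep (0, 0, 0, 0, 0, 0, 0)
  let (_, _, r1, base, idx, sc, off) := st
  let value : Int :=
    (2 <<< (60 : Nat)) + (PySem.Int.band opcode 255 <<< (52 : Nat)) + (0 <<< (46 : Nat)) +
      (PySem.Int.band r1 15 <<< (42 : Nat)) + (PySem.Int.band base 15 <<< (38 : Nat)) +
      (PySem.Int.band idx 15 <<< (34 : Nat)) + (PySem.Int.band sc 3 <<< (32 : Nat)) +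
      PySem.Int.band off 4294967295
  String.ofList (pvPadBin 64 value.toNat)   -- format(value, '064b'); 0 ≤ value < 2^64

-- ===== PRECONDITION & SPEC =====

-- Pre_ excludes exactly the keywords on which A's int(kw, 0) raises ValueError.
def Pre_encode_f2 (opcode : Int) (keywords : List String) : Prop :=
  ∀ kw ∈ keywords, pvIsReg kw = true ∨ (PySem.Int.ofStrBase? kw 0).isSome = true
instance (opcode : Int) (keywords : List String) : Decidable (Pre_encode_f2 opcode keywords) := by
  unfold Pre_encode_f2; infer_instance

def pvWitness_encode_f2 : Int × List String := (5, ["R3", "r10", "0x1f", "-2"])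

def Spec_encode_f2 (opcode : Int) (keywords : List String) (out : String) : Prop := out = encode_f2_alt opcode keywords
instance (opcode : Int) (keywords : List String) (out : String) : Decidable (Spec_encode_f2 opcode keywords out) := by unfold Spec_encode_f2; infer_instance

-- ===== CLAIM (what is proved, stated in full; the proofs are below) =====
def Claim_equal_encode_f2 : Prop := ∀ (opcode : Int) (keywords : List String), Dom_encode_f2 opcode keywords → Pre_encode_f2 opcode keywords → Spec_encode_f2 opcode keywords (encode_f2 opcode keywords)

-- ===== LEMMAS AND PROOFS =====

-- canonical recursion for Nat.toDigits 2
def pvBinDigits (n : Nat) : List Char :=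
  if h : n < 2 then [Nat.digitChar n]
  else pvBinDigits (n / 2) ++ [Nat.digitChar (n % 2)]
decreasing_by exact Nat.div_lt_self (by omega) (by omega)

theorem pvToDigitsCore_eq (f n : Nat) (acc : List Char) (h : n < f) :
    Nat.toDigitsCore 2 f n acc = pvBinDigits n ++ acc := by
  induction f generalizing n acc with
  | zero => omega
  | succ f ih =>
    by_cases h2 : n / 2 = 0
    · have hn : n < 2 := by omega
      simp only [Nat.toDigitsCore, h2, if_pos]
      rw [pvBinDigits]
      simp [hn, Nat.mod_eq_of_lt hn]
    · simp only [Nat.toDigitsCore, h2, if_neg, ite_false]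
      rw [ih (n / 2) _ (by omega)]
      conv_rhs => rw [pvBinDigits]
      have hn : ¬ n < 2 := by omega
      simp [hn]

theorem pvToDigits_eq (n : Nat) : Nat.toDigits 2 n = pvBinDigits n := by
  rw [Nat.toDigits, pvToDigitsCore_eq (n + 1) n [] (by omega)]
  simp

theorem pvBinDigits_mem (n : Nat) : ∀ c ∈ pvBinDigits n, c = '0' ∨ c = '1' := by
  induction n using Nat.strong_induction_on with
  | _ n ih =>
    rw [pvBinDigits]
    by_cases h : n < 2
    · interval_cases n <;> simp [Nat.digitChar]
    · simp only [h, dite_false]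
      intro c hc
      rcases List.mem_append.1 hc with h1 | h1
      · exact ih (n / 2) (Nat.div_lt_self (by omega) (by omega)) c h1
      · have h2 : n % 2 < 2 := Nat.mod_lt _ (by omega)
        simp only [List.mem_singleton] at h1
        subst h1
        interval_cases h3 : n % 2 <;> simp [Nat.digitChar]

theorem pvBinDigits_ne_nil (n : Nat) : pvBinDigits n ≠ [] := by
  rw [pvBinDigits]
  by_cases h : n < 2 <;> simp [h]

theorem pvPadBin_zero (w : Nat) : pvPadBin w 0 = List.replicate w '0' := by
  induction w with
  | zero => rfl
  | succ w ih => simp [pvPadBin, ih, Nat.digitChar, List.replicate_succ' (n := w)]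

theorem pvPadBin_mod (w v : Nat) : pvPadBin w (v % 2 ^ w) = pvPadBin w v := by
  induction w generalizing v with
  | zero => rfl
  | succ w ih =>
    have hdiv : v % 2 ^ (w + 1) / 2 = v / 2 % 2 ^ w := by
      rw [pow_succ']
      exact Nat.mod_mul_right_div_self v 2 (2 ^ w)
    have hmod : v % 2 ^ (w + 1) % 2 = v % 2 := by
      exact Nat.mod_mod_of_dvd v (dvd_pow_self 2 (by omega))
    simp [pvPadBin, hdiv, hmod, ih]

-- pvPadBin w v is the zero-extended / low-bit-truncated form of the binary digits of v
theorem pvPadBin_eq_binDigits (w v : Nat) :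
    pvPadBin w v =
      if (pvBinDigits v).length ≤ w then
        List.replicate (w - (pvBinDigits v).length) '0' ++ pvBinDigits v
      else (pvBinDigits v).drop ((pvBinDigits v).length - w) := by
  induction w generalizing v with
  | zero =>
    have := pvBinDigits_ne_nil v
    have hlen : 0 < (pvBinDigits v).length := List.length_pos_iff.2 this
    simp only [pvPadBin]
    rw [if_neg (by omega)]
    simp
  | succ w ih =>
    by_cases hv : v < 2
    · have hbd : pvBinDigits v = [Nat.digitChar v] := by rw [pvBinDigits]; simp [hv]
      have hd : v / 2 = 0 := by omega
      have hm : v % 2 = v := Nat.mod_eq_of_lt hv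
      simp only [pvPadBin, hd, hm, pvPadBin_zero, hbd]
      rw [if_pos (by simp)]
      simp [List.replicate_succ' (n := w)]
    · have hbd : pvBinDigits v = pvBinDigits (v / 2) ++ [Nat.digitChar (v % 2)] := by
        rw [pvBinDigits]; simp [hv]
      have ihv := ih (v / 2)
      simp only [pvPadBin, hbd, List.length_append, List.length_singleton]
      by_cases hl : (pvBinDigits (v / 2)).length ≤ w
      · rw [if_pos (by omega)]
        rw [if_pos hl] at ihv
        rw [ihv]
        simp [List.append_assoc]
      · rw [if_neg (by omega)]
        rw [if_neg hl] at ihv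
        rw [ihv]
        rw [show (pvBinDigits (v / 2)).length + 1 - (w + 1) = (pvBinDigits (v / 2)).length - w
          from by omega]
        rw [List.drop_append_of_le_length (by omega)]

theorem pvBand_mask (a : Int) (w : Nat) :
    PySem.Int.band a (2 ^ w - 1) = a % (2 ^ w) := by
  have hcast : ((2 : Int) ^ w) = ((2 ^ w : Nat) : Int) := by push_cast; ring
  have hpos : (0 : Nat) < 2 ^ w := Nat.two_pow_pos w
  have hb : (0 : Int) ≤ 2 ^ w - 1 := by rw [hcast]; omega
  have htop : ((2 : Int) ^ w - 1).toNat = 2 ^ w - 1 := by rw [hcast]; omega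
  by_cases ha : 0 ≤ a
  · rw [PySem.Int.band, if_pos ha, if_pos hb, htop,
      Nat.and_two_pow_sub_one_eq_mod a.toNat w, hcast]
    rw [Int.natCast_mod, Int.toNat_of_nonneg ha]
  · rw [PySem.Int.band, if_neg ha, if_pos hb, htop]
    set n := (-a - 1).toNat with hn
    have hna : (n : Int) = -a - 1 := by rw [hn]; omega
    rw [Nat.and_comm, Nat.and_two_pow_sub_one_eq_mod n w]
    set q := n / 2 ^ w with hq
    set r := n % 2 ^ w with hr
    have hdm : 2 ^ w * q + r = n := Nat.div_add_mod n (2 ^ w)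
    have hrlt : r < 2 ^ w := Nat.mod_lt n hpos
    have hsplit : (n : Int) = ((2 ^ w : Nat) : Int) * q + r := by exact_mod_cast hdm.symm
    have haval : a = (((2 ^ w : Nat) : Int) - 1 - r) + ((2 ^ w : Nat) : Int) * (-(q : Int) - 1) := by
      have : a = -(n : Int) - 1 := by omega
      rw [this, hsplit]; ring
    rw [hcast]
    conv_rhs => rw [haval]
    rw [Int.add_mul_emod_self_left]
    rw [Int.emod_eq_of_lt (by omega) (by omega)]
    have hrle : r ≤ 2 ^ w - 1 := by omega
    push_cast [Nat.cast_sub (by omega : 1 ≤ 2 ^ w), Nat.cast_sub hrle]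
    ring

theorem pvZfillCore (m w : Nat) (hw : 1 ≤ w) :
    (PySem.Str.slice
      (PySem.Str.zfill (PySem.Str.slice (PySem.Int.pyBin (m : Int)) (some 2) none) (w : Int))
      (some (-(w : Int))) none).toList = pvPadBin w m := by
  have hds : (PySem.Str.slice (PySem.Int.pyBin (m : Int)) (some 2) none).toList
      = pvBinDigits m := by
    rw [PySem.Str.toList_slice, PySem.Chars.slice_eq_listSlice,
      PySem.List.slice_from _ (by omega : (0:Int) ≤ 2)]
    rw [PySem.Int.pyBin]
    have : ¬ ((m : Int) < 0) := by omega
    simp [PySem.Int.toBinChars0b, this, pvToDigits_eq]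
  rw [PySem.Str.toList_slice, PySem.Chars.slice_eq_listSlice, PySem.Str.toList_zfill, hds]
  set ds := pvBinDigits m with hdsd
  have hne : ds ≠ [] := pvBinDigits_ne_nil m
  have hlen : 0 < ds.length := List.length_pos_iff.2 hne
  rw [pvPadBin_eq_binDigits, ← hdsd]
  by_cases hcase : (w : Int) ≤ ds.length
  · rw [PySem.Chars.zfill.eq_def, if_pos (by exact_mod_cast hcase)]
    have hwL : w ≤ ds.length := by exact_mod_cast hcase
    have hslice : PySem.List.slice ds (some (-(w : Int))) none = ds.drop (ds.length - w) := by
      simp only [PySem.List.slice, PySem.List.clampIdx]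
      rw [if_pos (by omega), if_neg (by omega)]
      have ha : ((ds.length : Int) + -(w : Int)).toNat = ds.length - w := by omega
      rw [ha]
      rw [List.take_of_length_le (by simp <;> omega)]
    rw [hslice]
    by_cases hLw : ds.length ≤ w
    · rw [if_pos hLw]
      have hEq : ds.length = w := by omega
      simp [hEq]
    · rw [if_neg hLw]
  · rw [PySem.Chars.zfill.eq_def, if_neg (by exact_mod_cast hcase)]
    have hLw : ds.length < w := by exact_mod_cast not_le.1 hcase
    obtain ⟨c, rest, hcr⟩ := List.exists_cons_of_ne_nil hne
    have hc : c = '0' ∨ c = '1' := pvBinDigits_mem m c (hdsd ▸ hcr ▸ List.mem_cons_self)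
    have hcsign : ¬ (c = '+' ∨ c = '-') := by rcases hc with h | h <;> subst h <;> decide
    rw [hcr]
    simp only [hcsign, if_neg, ite_false]
    rw [← hcr, Int.toNat_natCast]
    have hlenfull : (List.replicate (w - ds.length) '0' ++ ds).length = w := by
      simp; omega
    have hslice : PySem.List.slice (List.replicate (w - ds.length) '0' ++ ds)
        (some (-(w : Int))) none = List.replicate (w - ds.length) '0' ++ ds := by
      simp only [PySem.List.slice, PySem.List.clampIdx, hlenfull]
      rw [if_pos (by omega : -(w : Int) < 0), if_neg (by omega)]
      rw [show ((w : Int) + -(w : Int)).toNat = 0 from by omega]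
      rw [Nat.sub_zero, List.drop_zero, List.take_of_length_le (by omega)]
    rw [hslice, if_pos (by omega)]

theorem pvZfillBin_eq (x : Int) (w : Nat) (hw : 1 ≤ w) :
    (zfill_bin x w).toList = pvPadBin w ((x % (2 : Int) ^ w).toNat) := by
  have hcast : ((2 : Int) ^ w) = ((2 ^ w : Nat) : Int) := by push_cast; ring
  have hpos : (0 : Int) < 2 ^ w := by rw [hcast]; exact_mod_cast Nat.two_pow_pos w
  have hshift : ((1 : Int) <<< w - 1) = 2 ^ w - 1 := by rw [Int.shiftLeft_eq]; ring
  unfold zfill_bin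
  by_cases hx : x < 0
  · rw [if_pos hx, hshift, pvBand_mask]
    have h0 : 0 ≤ x % 2 ^ w := Int.emod_nonneg x (by omega)
    rw [show x % 2 ^ w = (((x % 2 ^ w).toNat : Nat) : Int) from (Int.toNat_of_nonneg h0).symm]
    simp only [Int.toNat_natCast]
    exact pvZfillCore _ w hw
  · rw [if_neg hx]
    have h0 : 0 ≤ x := by omega
    have hxx : x = ((x.toNat : Nat) : Int) := (Int.toNat_of_nonneg h0).symm
    have hmm : (x % 2 ^ w).toNat = x.toNat % 2 ^ w := by
      rw [hcast]
      conv_lhs => rw [hxx]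
      rw [← Int.natCast_mod, Int.toNat_natCast]
    rw [hmm, pvPadBin_mod]
    conv_lhs => rw [hxx]
    exact pvZfillCore _ w hw

theorem pvPadBin_split (w w1 w2 a b : Nat) (hw : w = w1 + w2) (hb : b < 2 ^ w2) :
    pvPadBin w (a * 2 ^ w2 + b) = pvPadBin w1 a ++ pvPadBin w2 b := by
  subst hw
  induction w2 generalizing b with
  | zero =>
    have hb0 : b = 0 := by simpa using hb
    subst hb0
    simp [pvPadBin]
  | succ w2 ih =>
    rw [show w1 + (w2 + 1) = (w1 + w2) + 1 from by omega]
    have hdiv : (a * 2 ^ (w2 + 1) + b) / 2 = a * 2 ^ w2 + b / 2 := by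
      rw [pow_succ, show a * (2 ^ w2 * 2) + b = 2 * (a * 2 ^ w2) + b from by ring,
        Nat.mul_add_div (by omega)]
    have hmod : (a * 2 ^ (w2 + 1) + b) % 2 = b % 2 := by
      rw [pow_succ, show a * (2 ^ w2 * 2) + b = 2 * (a * 2 ^ w2) + b from by ring,
        Nat.mul_add_mod]
    have hblt : b / 2 < 2 ^ w2 := by rw [pow_succ] at hb; omega
    simp only [pvPadBin, hdiv, hmod, ih (b / 2) hblt, List.append_assoc]

-- the loop invariant tying B's counters/slots to A's two lists
def pvRel (p : List Int × List Int) (q : Int × Int × Int × Int × Int × Int × Int) : Prop :=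
  q.1 = (p.1.length : Int) ∧ q.2.1 = (p.2.length : Int) ∧
  q.2.2.1 = p.1.getD 0 0 ∧ q.2.2.2.1 = p.1.getD 1 0 ∧ q.2.2.2.2.1 = p.1.getD 2 0 ∧
  q.2.2.2.2.2.1 = p.2.getD 0 0 ∧ q.2.2.2.2.2.2 = p.2.getD 1 0

theorem pvGetD_snoc (xs : List Int) (v : Int) (k : Nat) :
    (xs ++ [v]).getD k 0 =
      if k < xs.length then xs.getD k 0 else if k = xs.length then v else 0 := by
  rcases lt_trichotomy k xs.length with h | h | h
  · rw [if_pos h, List.getD_eq_getElem?_getD, List.getElem?_append_left h,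
      ← List.getD_eq_getElem?_getD]
  · subst h
    rw [if_neg (by omega), if_pos rfl]
    simp [List.getD_eq_getElem?_getD, List.getElem?_append_right (le_refl xs.length)]
  · rw [if_neg (by omega), if_neg (by omega)]
    rw [List.getD_eq_getElem?_getD, List.getElem?_append_right (by omega : xs.length ≤ k)]
    rw [List.getElem?_eq_none (by simp; omega)]
    rfl

theorem pvOob (xs : List Int) (k : Nat) (h : xs.length ≤ k) : xs.getD k 0 = 0 := by
  rw [List.getD_eq_getElem?_getD, List.getElem?_eq_none h]
  rfl

theorem pvRel_step (kw : String) (p : List Int × List Int)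
    (q : Int × Int × Int × Int × Int × Int × Int) (h : pvRel p q) :
    pvRel
      (if pvIsReg kw then (p.1 ++ [pvRegVal kw], p.2)
       else (p.1, p.2 ++ [(PySem.Int.ofStrBase? kw 0).getD 0]))
      (pvAltStep q kw) := by
  obtain ⟨xs, ys⟩ := p
  obtain ⟨rc, lc, r1, b2, i2, s2, o2⟩ := q
  obtain ⟨h1, h2, h3, h4, h5, h6, h7⟩ := h
  simp only at h1 h2 h3 h4 h5 h6 h7
  subst h1 h2 h3 h4 h5 h6 h7
  have hlen : ∀ v : Int, ((xs ++ [v]).length : Int) = (xs.length : Int) + 1 := by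
    intro v; simp only [List.length_append, List.length_cons, List.length_nil]; push_cast; ring
  have hlenl : ∀ v : Int, ((ys ++ [v]).length : Int) = (ys.length : Int) + 1 := by
    intro v; simp only [List.length_append, List.length_cons, List.length_nil]; push_cast; ring
  by_cases hreg : pvIsReg kw
  · rw [if_pos hreg]
    simp only [pvAltStep, beq_iff_eq]
    rw [if_pos hreg]
    set v := pvRegVal kw with hv
    split_ifs with hA hB hC
    · have hL : xs.length = 0 := by exact_mod_cast hA
      exact ⟨(hlen v).symm, rfl,
        by rw [pvGetD_snoc]; simp [hL],
        by rw [pvGetD_snoc]; simp [hL, pvOob xs 1 (by omega)],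
        by rw [pvGetD_snoc]; simp [hL, pvOob xs 2 (by omega)], rfl, rfl⟩
    · have hL : xs.length = 1 := by exact_mod_cast hB
      exact ⟨(hlen v).symm, rfl,
        by rw [pvGetD_snoc]; simp [hL],
        by rw [pvGetD_snoc]; simp [hL],
        by rw [pvGetD_snoc]; simp [hL, pvOob xs 2 (by omega)], rfl, rfl⟩
    · have hL : xs.length = 2 := by exact_mod_cast hC
      exact ⟨(hlen v).symm, rfl,
        by rw [pvGetD_snoc]; simp [hL],
        by rw [pvGetD_snoc]; simp [hL],
        by rw [pvGetD_snoc]; simp [hL], rfl, rfl⟩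
    · have hL : 3 ≤ xs.length := by
        rcases Nat.lt_or_ge xs.length 3 with h | h
        · interval_cases h2 : xs.length <;> simp [h2] at hA hB hC <;> omega
        · exact h
      exact ⟨(hlen v).symm, rfl,
        by rw [pvGetD_snoc, if_pos (by omega)],
        by rw [pvGetD_snoc, if_pos (by omega)],
        by rw [pvGetD_snoc, if_pos (by omega)], rfl, rfl⟩
  · rw [if_neg hreg]
    simp only [pvAltStep, beq_iff_eq]
    rw [if_neg hreg]
    set v := (PySem.Int.ofStrBase? kw 0).getD 0 with hv
    split_ifs with hA hB
    · have hL : ys.length = 0 := by exact_mod_cast hA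
      exact ⟨rfl, (hlenl v).symm, rfl, rfl, rfl,
        by rw [pvGetD_snoc]; simp [hL],
        by rw [pvGetD_snoc]; simp [hL, pvOob ys 1 (by omega)]⟩
    · have hL : ys.length = 1 := by exact_mod_cast hB
      exact ⟨rfl, (hlenl v).symm, rfl, rfl, rfl,
        by rw [pvGetD_snoc]; simp [hL],
        by rw [pvGetD_snoc]; simp [hL]⟩
    · have hL : 2 ≤ ys.length := by
        rcases Nat.lt_or_ge ys.length 2 with h | h
        · interval_cases h2 : ys.length <;> simp [h2] at hA hB <;> omega
        · exact h
      exact ⟨rfl, (hlenl v).symm, rfl, rfl, rfl,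
        by rw [pvGetD_snoc, if_pos (by omega)],
        by rw [pvGetD_snoc, if_pos (by omega)]⟩

theorem pvRel_fold (kws : List String) (p : List Int × List Int)
    (q : Int × Int × Int × Int × Int × Int × Int) (h : pvRel p q) :
    pvRel
      (kws.foldl (fun (acc : List Int × List Int) kw =>
        if pvIsReg kw then (acc.1 ++ [pvRegVal kw], acc.2)
        else (acc.1, acc.2 ++ [(PySem.Int.ofStrBase? kw 0).getD 0])) p)
      (kws.foldl pvAltStep q) := by
  induction kws generalizing p q with
  | nil => simpa using h
  | cons kw kws ih =>
    simp only [List.foldl_cons]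
    exact ih _ _ (pvRel_step kw p q h)

theorem pvAssembly (o r b i s f : Int) :
    "0010" ++ zfill_bin o 8 ++ zfill_bin 0 6 ++ zfill_bin r 4 ++ zfill_bin b 4 ++
      zfill_bin i 4 ++ zfill_bin s 2 ++ zfill_bin f 32 =
    String.ofList (pvPadBin 64
      ((2 <<< (60 : Nat)) + (PySem.Int.band o 255 <<< (52 : Nat)) + (0 <<< (46 : Nat)) +
        (PySem.Int.band r 15 <<< (42 : Nat)) + (PySem.Int.band b 15 <<< (38 : Nat)) +
        (PySem.Int.band i 15 <<< (34 : Nat)) + (PySem.Int.band s 3 <<< (32 : Nat)) +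
        PySem.Int.band f 4294967295 : Int).toNat) := by
  have hnn : ∀ (y : Int) (w : Nat), (0 : Int) ≤ y % 2 ^ w := by
    intro y w
    exact Int.emod_nonneg y (by positivity)
  have hlt : ∀ (y : Int) (w : Nat), y % 2 ^ w < 2 ^ w := by
    intro y w
    exact Int.emod_lt_of_pos y (by positivity)
  have hbound : ∀ (y : Int) (w : Nat), (y % (2 : Int) ^ w).toNat < 2 ^ w := by
    intro y w
    have h1 := hnn y w
    have h2 := hlt y w
    have hc : ((2 : Int) ^ w) = ((2 ^ w : Nat) : Int) := by push_cast; ring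
    rw [hc] at h2
    omega
  have e8 := pvZfillBin_eq o 8 (by omega)
  have e6 := pvZfillBin_eq 0 6 (by omega)
  have e4r := pvZfillBin_eq r 4 (by omega)
  have e4b := pvZfillBin_eq b 4 (by omega)
  have e4i := pvZfillBin_eq i 4 (by omega)
  have e2 := pvZfillBin_eq s 2 (by omega)
  have e32 := pvZfillBin_eq f 32 (by omega)
  set ao := (o % (2 : Int) ^ 8).toNat with hao
  set ar := (r % (2 : Int) ^ 4).toNat with har
  set ab := (b % (2 : Int) ^ 4).toNat with hab
  set ai := (i % (2 : Int) ^ 4).toNat with hai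
  set as' := (s % (2 : Int) ^ 2).toNat with has
  set af := (f % (2 : Int) ^ 32).toNat with haf
  have hmask8 : PySem.Int.band o 255 = o % 2 ^ 8 := by
    rw [show (255 : Int) = 2 ^ 8 - 1 from by norm_num]; exact pvBand_mask o 8
  have hmask4r : PySem.Int.band r 15 = r % 2 ^ 4 := by
    rw [show (15 : Int) = 2 ^ 4 - 1 from by norm_num]; exact pvBand_mask r 4
  have hmask4b : PySem.Int.band b 15 = b % 2 ^ 4 := by
    rw [show (15 : Int) = 2 ^ 4 - 1 from by norm_num]; exact pvBand_mask b 4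
  have hmask4i : PySem.Int.band i 15 = i % 2 ^ 4 := by
    rw [show (15 : Int) = 2 ^ 4 - 1 from by norm_num]; exact pvBand_mask i 4
  have hmask2 : PySem.Int.band s 3 = s % 2 ^ 2 := by
    rw [show (3 : Int) = 2 ^ 2 - 1 from by norm_num]; exact pvBand_mask s 2
  have hmask32 : PySem.Int.band f 4294967295 = f % 2 ^ 32 := by
    rw [show (4294967295 : Int) = 2 ^ 32 - 1 from by norm_num]; exact pvBand_mask f 32
  have hval : (2 <<< (60 : Nat)) + (PySem.Int.band o 255 <<< (52 : Nat)) + (0 <<< (46 : Nat)) +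
      (PySem.Int.band r 15 <<< (42 : Nat)) + (PySem.Int.band b 15 <<< (38 : Nat)) +
      (PySem.Int.band i 15 <<< (34 : Nat)) + (PySem.Int.band s 3 <<< (32 : Nat)) +
      PySem.Int.band f 4294967295
      = ((((((((2 * 2 ^ 8 + ao) * 2 ^ 6 + 0) * 2 ^ 4 + ar) * 2 ^ 4 + ab) * 2 ^ 4 + ai) * 2 ^ 2
          + as') * 2 ^ 32 + af : Nat) : Int) := by
    rw [hmask8, hmask4r, hmask4b, hmask4i, hmask2, hmask32]
    rw [show o % (2:Int) ^ 8 = (ao : Int) from (Int.toNat_of_nonneg (hnn o 8)).symm,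
      show r % (2:Int) ^ 4 = (ar : Int) from (Int.toNat_of_nonneg (hnn r 4)).symm,
      show b % (2:Int) ^ 4 = (ab : Int) from (Int.toNat_of_nonneg (hnn b 4)).symm,
      show i % (2:Int) ^ 4 = (ai : Int) from (Int.toNat_of_nonneg (hnn i 4)).symm,
      show s % (2:Int) ^ 2 = (as' : Int) from (Int.toNat_of_nonneg (hnn s 2)).symm,
      show f % (2:Int) ^ 32 = (af : Int) from (Int.toNat_of_nonneg (hnn f 32)).symm]
    simp only [Int.shiftLeft_eq]
    push_cast
    ring
  rw [hval, Int.toNat_natCast]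
  rw [pvPadBin_split 64 32 32 _ af (by norm_num) (hbound f 32)]
  rw [pvPadBin_split 32 30 2 _ as' (by norm_num) (hbound s 2)]
  rw [pvPadBin_split 30 26 4 _ ai (by norm_num) (hbound i 4)]
  rw [pvPadBin_split 26 22 4 _ ab (by norm_num) (hbound b 4)]
  rw [pvPadBin_split 22 18 4 _ ar (by norm_num) (hbound r 4)]
  rw [pvPadBin_split 18 12 6 _ 0 (by norm_num) (by norm_num)]
  rw [pvPadBin_split 12 4 8 2 ao (by norm_num) (hbound o 8)]
  have hlist : ("0010" ++ zfill_bin o 8 ++ zfill_bin 0 6 ++ zfill_bin r 4 ++ zfill_bin b 4 ++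
      zfill_bin i 4 ++ zfill_bin s 2 ++ zfill_bin f 32).toList
      = pvPadBin 4 2 ++ pvPadBin 8 ao ++ pvPadBin 6 0 ++ pvPadBin 4 ar ++ pvPadBin 4 ab ++
        pvPadBin 4 ai ++ pvPadBin 2 as' ++ pvPadBin 32 af := by
    have e6' : (zfill_bin 0 6).toList = pvPadBin 6 0 := by rw [e6]; norm_num
    simp only [String.toList_append, e8, e6', e4r, e4b, e4i, e2, e32]
    rw [show "0010".toList = pvPadBin 4 2 from by decide]
  have := congrArg String.ofList hlist
  rw [String.ofList_toList] at this
  rw [this]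

-- ===== VERDICT (by name: the statement is the Claim_ definition above) =====
theorem encode_f2_spec : Claim_equal_encode_f2 := by
  intro opcode kws _ _
  unfold Spec_encode_f2 encode_f2 encode_f2_alt
  have hrel := pvRel_fold kws ([], []) (0, 0, 0, 0, 0, 0, 0) (by simp [pvRel])
  set pst := kws.foldl (fun (acc : List Int × List Int) kw =>
      if pvIsReg kw then (acc.1 ++ [pvRegVal kw], acc.2)
      else (acc.1, acc.2 ++ [(PySem.Int.ofStrBase? kw 0).getD 0])) ([], []) with hpst
  generalize hq : kws.foldl pvAltStep (0, 0, 0, 0, 0, 0, 0) = qst at *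
  obtain ⟨rc, lc, r1, b2, i2, s2, o2⟩ := qst
  obtain ⟨h1, h2, h3, h4, h5, h6, h7⟩ := hrel
  simp only at h1 h2 h3 h4 h5 h6 h7
  have hsel0 : ∀ xs : List Int,
      (if 0 < xs.length then PySem.List.pyGetD xs 0 0 else 0) = xs.getD 0 0 := by
    intro xs
    by_cases h : 0 < xs.length
    · rw [if_pos h, PySem.List.pyGetD_zero]
    · rw [if_neg h]
      exact (pvOob xs 0 (by omega)).symm
  have hsel1 : ∀ xs : List Int,
      (if 1 < xs.length then PySem.List.pyGetD xs 1 0 else 0) = xs.getD 1 0 := by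
    intro xs
    by_cases h : 1 < xs.length
    · rw [if_pos h, show (1 : Int) = ((1 : Nat) : Int) from by norm_num,
        PySem.List.pyGetD_natCast]
    · rw [if_neg h]
      exact (pvOob xs 1 (by omega)).symm
  have hsel2 : ∀ xs : List Int,
      (if 2 < xs.length then PySem.List.pyGetD xs 2 0 else 0) = xs.getD 2 0 := by
    intro xs
    by_cases h : 2 < xs.length
    · rw [if_pos h, show (2 : Int) = ((2 : Nat) : Int) from by norm_num,
        PySem.List.pyGetD_natCast]
    · rw [if_neg h]
      exact (pvOob xs 2 (by omega)).symm
  simp only [hsel0, hsel1, hsel2, ← h3, ← h4, ← h5, ← h6, ← h7]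
  exact pvAssembly opcode r1 b2 i2 s2 o2
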